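-- pv_equiv track=rewrite | github.com/aswine18916/PythonPrograms | InitialPrograms/sudoku.py | first_check
-- ===== SOURCE A (Python) =====
-- def first_check(sud):
--     for each in sud:
--         for i in each:
--             if i in range(1,10) and each.count(i)!=1:
--                 return False
--                 break
--             else:
--                 continue
--         return True
-- ===== SOURCE B (Python) =====
-- def first_check(sud):
--     row = sorted(i for i in sud[0] if i in range(1, 10))
--     return all(a != b for a, b in zip(row, row[1:]))
-- ===== Notes on version B (the rewrite author's own statement) =====
-- stated objective: alternative
-- what changed: Sort-then-adjacent-scan instead of per-element count scans: B takes the first row directly (A only ever inspects the first row), sorts its in-range digits and reports a duplicate iff two sorted neighbours are equal; Pre_ excludes the empty outer list, on which A returns None (not a bool) and B raises IndexError.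
-- outside the precondition, e.g. on first_check([]): A returns None, B raises IndexError
import Mathlib
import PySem

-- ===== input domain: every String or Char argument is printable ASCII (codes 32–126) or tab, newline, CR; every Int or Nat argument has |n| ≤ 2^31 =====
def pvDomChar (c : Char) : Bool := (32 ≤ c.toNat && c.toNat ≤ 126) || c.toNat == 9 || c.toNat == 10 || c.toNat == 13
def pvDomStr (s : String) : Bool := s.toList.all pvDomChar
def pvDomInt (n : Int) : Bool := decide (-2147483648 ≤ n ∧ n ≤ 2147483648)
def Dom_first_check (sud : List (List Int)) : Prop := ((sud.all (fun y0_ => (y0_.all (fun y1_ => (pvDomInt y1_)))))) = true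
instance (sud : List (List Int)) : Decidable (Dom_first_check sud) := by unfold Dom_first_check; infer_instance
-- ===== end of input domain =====

-- B replaces A's per-element count scans by sort-then-adjacent-scan over the first row's in-range digits (alternative algorithm).


-- ===== PORT A =====
-- inner 'for i in each: …' loop of A; 'each' is the full row (for each.count(i))
def fcLoopA (each : List Int) : List Int → Bool
  | [] => true
  | i :: rest =>
      if (PySem.List.pyRange 1 10 1).contains i && PySem.List.count each i != 1 then
        false
      else
        fcLoopA each rest

def first_check (sud : List (List Int)) : Bool :=
  match sud with
  | [] => false          -- unreachable under Pre_first_check (Python A falls off the loop and returns None here)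
  | each :: _ => fcLoopA each each

-- ===== PORT B =====
def first_check_alt (sud : List (List Int)) : Bool :=
  match sud with
  | [] => false          -- unreachable under Pre_first_check (Python B raises IndexError on sud[0] here)
  | each :: _ =>
      -- row = sorted(i for i in sud[0] if i in range(1, 10))
      let row := PySem.List.sorted (each.filter (fun i => (PySem.List.pyRange 1 10 1).contains i)) (fun x => x) false
      -- all(a != b for a, b in zip(row, row[1:]))   (row[1:] = row.drop 1)
      (row.zip (row.drop 1)).all (fun p => p.1 != p.2)

-- ===== PRECONDITION & SPEC =====
-- Pre_ excludes the empty outer list, on which A returns None (not a bool) and B raises IndexError.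
def Pre_first_check (sud : List (List Int)) : Prop := sud ≠ []
instance (sud : List (List Int)) : Decidable (Pre_first_check sud) := by unfold Pre_first_check; infer_instance
def pvWitness_first_check : List (List Int) := [[1, 2, 3]]

def Spec_first_check (sud : List (List Int)) (out : Bool) : Prop := out = first_check_alt sud
instance (sud : List (List Int)) (out : Bool) : Decidable (Spec_first_check sud out) := by unfold Spec_first_check; infer_instance

-- ===== CLAIM =====
def Claim_equal_first_check : Prop := ∀ (sud : List (List Int)), Dom_first_check sud → Pre_first_check sud → Spec_first_check sud (first_check sud)

-- ===== LEMMAS AND PROOFS =====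

theorem fcLoopA_eq_true_iff (each l : List Int) :
    fcLoopA each l = true ↔
      ∀ i ∈ l, (PySem.List.pyRange 1 10 1).contains i = true → List.count i each = 1 := by
  induction l with
  | nil => simp [fcLoopA]
  | cons i rest ih =>
      simp only [fcLoopA]
      split
      · rename_i h
        simp only [Bool.and_eq_true, bne_iff_ne, ne_eq] at h
        constructor
        · intro hf; cases hf
        · intro hall
          exact absurd (by simpa [PySem.List.count_eq] using hall i (by simp) h.1) h.2
      · rename_i h
        simp only [Bool.and_eq_true, bne_iff_ne, ne_eq, not_and, not_not] at h
        rw [ih]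
        constructor
        · intro hall j hj hjr
          rcases List.mem_cons.mp hj with rfl | hj'
          · simpa [PySem.List.count_eq] using h hjr
          · exact hall j hj' hjr
        · intro hall j hj hjr
          exact hall j (List.mem_cons_of_mem _ hj) hjr

theorem count_filter_eq (p : Int → Bool) (each : List Int) (i : Int) :
    List.count i (each.filter p) = if p i then List.count i each else 0 := by
  by_cases hpi : p i = true
  · rw [List.count_filter hpi, if_pos hpi]
  · rw [if_neg hpi]
    refine List.count_eq_zero_of_not_mem ?_
    intro hmem
    exact hpi (List.mem_filter.mp hmem).2

-- A returns true on a row iff the in-range elements of the row are pairwise distinct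
theorem loopA_iff_nodup (each : List Int) :
    fcLoopA each each = true ↔
      (each.filter (fun i => (PySem.List.pyRange 1 10 1).contains i)).Nodup := by
  rw [fcLoopA_eq_true_iff]
  constructor
  · intro hall
    rw [List.nodup_iff_count_le_one]
    intro i
    rw [count_filter_eq]
    by_cases hpi : (PySem.List.pyRange 1 10 1).contains i = true
    · rw [if_pos hpi]
      by_cases hi : i ∈ each
      · rw [hall i hi hpi]
      · simp [List.count_eq_zero_of_not_mem hi]
    · rw [if_neg hpi]; omega
  · intro hnd i hi hpi
    have hi' : i ∈ each.filter (fun i => (PySem.List.pyRange 1 10 1).contains i) :=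
      List.mem_filter.mpr ⟨hi, hpi⟩
    have h1 : List.count i (each.filter (fun i => (PySem.List.pyRange 1 10 1).contains i)) ≤ 1 :=
      List.nodup_iff_count_le_one.mp hnd i
    have h2 := count_filter_eq (fun i => (PySem.List.pyRange 1 10 1).contains i) each i
    rw [if_pos hpi] at h2
    have h3 : 1 ≤ List.count i each := List.one_le_count_iff.mpr hi
    omega

-- on a ≤-sorted list, "no two adjacent elements equal" is exactly Nodup
theorem adjNe_iff_nodup : ∀ (l : List Int), l.Pairwise (· ≤ ·) →
    (((l.zip (l.drop 1)).all (fun p => p.1 != p.2)) = true ↔ l.Nodup)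
  | [], _ => by simp
  | [a], _ => by simp
  | a :: b :: u, hp => by
      have hpt : (b :: u).Pairwise (· ≤ ·) := (List.pairwise_cons.mp hp).2
      have hab : a ≤ b := (List.pairwise_cons.mp hp).1 b (by simp)
      have hau : ∀ x ∈ b :: u, a ≤ x := (List.pairwise_cons.mp hp).1
      have ih := adjNe_iff_nodup (b :: u) hpt
      simp only [List.drop, List.zip_cons_cons, List.all_cons, Bool.and_eq_true, bne_iff_ne, ne_eq]
      rw [show List.drop 1 (b :: u) = u from rfl] at ih
      rw [ih]
      constructor
      · rintro ⟨hne, hnd⟩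
        refine List.nodup_cons.mpr ⟨?_, hnd⟩
        intro hmem
        rcases List.mem_cons.mp hmem with rfl | hu
        · exact hne rfl
        · have hbx : b ≤ a := (List.pairwise_cons.mp hpt).1 a hu
          exact hne (le_antisymm hab hbx)
      · intro h
        obtain ⟨hnm, hnd⟩ := List.nodup_cons.mp h
        exact ⟨fun heq => hnm (heq ▸ List.mem_cons_self), hnd⟩

theorem main_row (each : List Int) :
    fcLoopA each each =
      (let row := PySem.List.sorted (each.filter (fun i => (PySem.List.pyRange 1 10 1).contains i)) (fun x => x) false
       (row.zip (row.drop 1)).all (fun p => p.1 != p.2)) := by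
  set f := each.filter (fun i => (PySem.List.pyRange 1 10 1).contains i) with hf
  set row := PySem.List.sorted f (fun x => x) false with hrow
  have hperm : row.Perm f := PySem.List.sorted_perm f (fun x => x) false
  have hpw : row.Pairwise (· ≤ ·) := by
    have := PySem.List.sorted_pairwise (xs := f) (key := fun x => x)
    simpa using this
  rw [Bool.eq_iff_iff, loopA_iff_nodup, adjNe_iff_nodup row hpw]
  exact (hperm.nodup_iff).symm

-- ===== VERDICT =====
theorem first_check_spec : Claim_equal_first_check := by
  intro sud _ hpre
  unfold Spec_first_check first_check first_check_alt
  match sud with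
  | [] => exact absurd rfl hpre
  | each :: rest => simpa using main_row each
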